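-- pv_equiv track=rewrite | github.com/xuzhougeng/HCR_designer | src/common/sequence_utils.py | has_dimer_issues
-- ===== SOURCE A (Python) =====
-- from typing import Dict, List
--
-- def is_complementary(seq1, seq2):
--     """检查两个序列是否互补
--
--     ATGC 和 TACG 是互补的
--
--     Parameters:
--     -----------
--     seq1 : str
--         序列1
--     seq2 : str
--         序列2
--
--     Returns:
--     --------
--     bool: 如果序列互补则返回True，否则返回False
--     """
--     if len(seq1) != len(seq2):
--         return False
--     pairs = {'A': 'T', 'T': 'A', 'C': 'G', 'G': 'C'}
--     for b1, b2 in zip(seq1, seq2):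
--         if b2 != pairs.get(b1):
--             return False
--     return True
--
-- def check_complementarity(seq1: str, seq2: str, min_complementary_length: int = 4) -> Dict[str, bool]:
--     """检查两个序列序列之间的互补性"""
--     len1, len2 = len(seq1), len(seq2)
--
--     # 检查局部互补性
--     for i in range(len1 - min_complementary_length + 1):
--         for j in range(len2 - min_complementary_length + 1):
--             if is_complementary(seq1[i:i+min_complementary_length],
--                               seq2[j:j+min_complementary_length][::-1]):
--                 return {'has_complementarity': True, 'end_complementarity': False}
--
--     # 检查3'端互补性
--     end_length = min(5, min_complementary_length)
--     end_complementarity = is_complementary(seq1[-end_length:], seq2[-end_length:][::-1])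
--
--     return {
--         'has_complementarity': False,
--         'end_complementarity': end_complementarity
--     }
--
-- def has_dimer_issues(seqs: List[str], min_complementary_length: int = 4) -> bool:
--     """
--     检查一组引物是否存在二聚体问题
--
--     Parameters:
--     -----------
--     seqs : list
--         引物序列列表
--     min_complementary_length : int, optional
--         判定为互补的最小连续碱基长度 (default: 4)
--
--     Returns:
--     --------
--     bool: 如果存在二聚体问题则返回True，否则返回False
--
--     Example:
--         >>> has_dimer_issues(["ATGC", "GCAT"])
--         True
--     """
--     if not seqs:
--         return False
--
--     # 检查所有可能的引物对
--     for i in range(len(seqs)):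
--         # 检查自身互补
--         if len(seqs[i]) >= min_complementary_length * 2:
--             result = check_complementarity(seqs[i][:len(seqs[i])//2],
--                                         seqs[i][len(seqs[i])//2:],
--                                         min_complementary_length)
--             if result['has_complementarity']:
--                 return True
--
--         # 检查与其他引物的互补
--         for j in range(i + 1, len(seqs)):
--             result = check_complementarity(seqs[i], seqs[j], min_complementary_length)
--             if result['has_complementarity']:
--                 return True
--
--     return False
-- ===== SOURCE B (Python) =====
-- # B: per-sequence L-mer sets + reverse-complement membership test, instead of
-- # comparing every window of one sequence with every window of the other.
--
-- _COMP = {'A': 'T', 'T': 'A', 'C': 'G', 'G': 'C'}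
--
--
-- def _kmers(s, L):
--     return {s[k:k + L] for k in range(len(s) - L + 1)}
--
--
-- def _revcomp(w):
--     if all(c in _COMP for c in w):
--         return ''.join(_COMP[c] for c in reversed(w))
--     return None
--
--
-- def _dimerize(ks1, ks2):
--     for w in ks1:
--         r = _revcomp(w)
--         if r is not None and r in ks2:
--             return True
--     return False
--
--
-- def has_dimer_issues(seqs, min_complementary_length=4):
--     L = min_complementary_length
--     if L <= 0:
--         # a non-positive threshold is met vacuously (the empty run is
--         # complementary), so any sequence at all is a dimer issue
--         return bool(seqs)
--     ksets = [_kmers(s, L) for s in seqs]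
--     for i, s in enumerate(seqs):
--         if len(s) >= 2 * L:
--             h = len(s) // 2
--             if _dimerize(_kmers(s[:h], L), _kmers(s[h:], L)):
--                 return True
--         for j in range(i + 1, len(seqs)):
--             if _dimerize(ksets[i], ksets[j]):
--                 return True
--     return False
-- ===== Notes on version B (the rewrite author's own statement) =====
-- stated objective: faster
-- what changed: A compares every length-L window of one sequence against every length-L window of the other char by char (four nested loops); B builds one set of L-mers per sequence and tests, for each L-mer, whether its reverse complement is in the other sequence's set.
import Mathlib
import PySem

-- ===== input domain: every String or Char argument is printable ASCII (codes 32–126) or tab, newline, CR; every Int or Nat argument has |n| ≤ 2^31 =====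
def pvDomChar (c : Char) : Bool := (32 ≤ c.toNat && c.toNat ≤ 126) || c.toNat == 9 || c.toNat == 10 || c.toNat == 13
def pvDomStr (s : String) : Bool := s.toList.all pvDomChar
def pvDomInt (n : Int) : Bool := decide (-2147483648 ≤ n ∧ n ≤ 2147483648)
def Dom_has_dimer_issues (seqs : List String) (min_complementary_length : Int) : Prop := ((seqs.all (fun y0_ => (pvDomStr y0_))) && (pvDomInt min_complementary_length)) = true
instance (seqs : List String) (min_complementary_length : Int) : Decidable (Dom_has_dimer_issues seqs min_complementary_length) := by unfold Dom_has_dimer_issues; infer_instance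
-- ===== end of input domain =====

-- B replaces A's four nested window loops (every window of seq1 against every window
-- of seq2, compared char by char) by one L-mer set per sequence plus a
-- reverse-complement membership test; measurably faster on large inputs.

-- ===== PORT A =====
-- string helpers are ported on `List Char` (PySem.Chars side); `has_dimer_issues`
-- converts via `.toList` once per access, which is exact for Python's str operations.

-- the complement-pairs dict: `pairs` in A's is_complementary and `_COMP` in Source B
def pvCOMP : PySem.Dict Char Char :=
  PySem.Dict.ofList [('A', 'T'), ('T', 'A'), ('C', 'G'), ('G', 'C')]

-- is_complementary(seq1, seq2): length check, then the early-return loop over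
-- zip(seq1, seq2) testing `b2 != pairs.get(b1)` (b2 never equals None) is `.all`.
def pvIsComp (s1 s2 : List Char) : Bool :=
  if s1.length ≠ s2.length then false
  else (s1.zip s2).all (fun b =>
    match pvCOMP.get? b.1 with
    | some c => b.2 == c
    | none => false)

-- `for i in range(a, b): if f(i): return True` — lazy early-exit loop over the
-- range bounds, exactly Python's lazy range iteration (no list is materialized)
def pvForRange (a b : Int) (f : Int → Bool) : Bool :=
  if h : a < b then
    if f a then true else pvForRange (a + 1) b f
  else false
termination_by (b - a).toNat
decreasing_by omega

-- the double loop of check_complementarity (early return True);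
-- seq2[j:j+L][::-1] is slice-then-reverse
def pvLocalScan (l1 l2 : List Char) (L : Int) : Bool :=
  pvForRange 0 ((l1.length : Int) - L + 1) (fun i =>
    pvForRange 0 ((l2.length : Int) - L + 1) (fun j =>
      pvIsComp (PySem.List.slice l1 (some i) (some (i + L)))
               ((PySem.List.slice l2 (some j) (some (j + L))).reverse)))

-- check_complementarity: its two-key result dict {'has_complementarity': _,
-- 'end_complementarity': _} is ported as the pair (has, end).
def pvCheckComp (l1 l2 : List Char) (L : Int) : Bool × Bool :=
  if pvLocalScan l1 l2 L then (true, false)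
  else
    let endLen := min 5 L
    (false, pvIsComp (PySem.List.slice l1 (some (-endLen)) none)
                     ((PySem.List.slice l2 (some (-endLen)) none).reverse))

def has_dimer_issues (seqs : List String) (min_complementary_length : Int) : Bool :=
  if seqs.isEmpty then false
  else
    (PySem.List.pyRange 0 (seqs.length : Int) 1).any (fun i =>
      -- seqs[i]: i drawn from range(len(seqs)), always in range
      let si := (PySem.List.pyGetD seqs i "").toList
      let n : Int := si.length
      (if n ≥ min_complementary_length * 2 then
         (pvCheckComp (PySem.List.slice si none (some (PySem.Int.floordiv n 2)))
                      (PySem.List.slice si (some (PySem.Int.floordiv n 2)) none)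
                      min_complementary_length).1
       else false)
      ||
      (PySem.List.pyRange (i + 1) (seqs.length : Int) 1).any (fun j =>
        (pvCheckComp si (PySem.List.pyGetD seqs j "").toList min_complementary_length).1))

-- ===== PORT B =====

-- _kmers(s, L) = {s[k:k+L] for k in range(len(s) - L + 1)}
def pvKmerSet (s : List Char) (L : Int) : PySem.Set (List Char) :=
  PySem.Set.ofList ((PySem.List.pyRange 0 ((s.length : Int) - L + 1) 1).map
    (fun k => PySem.List.slice s (some k) (some (k + L))))

-- _revcomp(w): the `_COMP[c]` lookup is guaranteed by the `all` guard (getD default unused)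
def pvRevcomp (w : List Char) : Option (List Char) :=
  if w.all (fun c => pvCOMP.contains c) then
    some (w.reverse.map (fun c => (pvCOMP.get? c).getD 'A'))
  else none

-- _dimerize: any over the L-mer set (order-independent result)
def pvDimerize (ks1 ks2 : PySem.Set (List Char)) : Bool :=
  ks1.any (fun w =>
    match pvRevcomp w with
    | some r => PySem.Set.contains ks2 r
    | none => false)

def has_dimer_issues_alt (seqs : List String) (min_complementary_length : Int) : Bool :=
  let L := min_complementary_length
  -- a non-positive threshold is met vacuously: any sequence at all is an issue
  if L ≤ 0 then !seqs.isEmpty else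
  let ksets := seqs.map (fun s => pvKmerSet s.toList L)
  (PySem.List.pyRange 0 (seqs.length : Int) 1).any (fun i =>
    -- seqs[i], ksets[i], ksets[j]: indices always in range
    let s := (PySem.List.pyGetD seqs i "").toList
    (if (s.length : Int) ≥ 2 * L then
       pvDimerize (pvKmerSet (PySem.List.slice s none (some (PySem.Int.floordiv (s.length : Int) 2))) L)
                  (pvKmerSet (PySem.List.slice s (some (PySem.Int.floordiv (s.length : Int) 2)) none) L)
     else false)
    ||
    (PySem.List.pyRange (i + 1) (seqs.length : Int) 1).any (fun j =>
      pvDimerize (PySem.List.pyGetD ksets i PySem.Set.empty)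
                 (PySem.List.pyGetD ksets j PySem.Set.empty)))

-- ===== PRECONDITION & SPEC =====
def Spec_has_dimer_issues (seqs : List String) (min_complementary_length : Int) (out : Bool) : Prop := out = has_dimer_issues_alt seqs min_complementary_length
instance (seqs : List String) (min_complementary_length : Int) (out : Bool) : Decidable (Spec_has_dimer_issues seqs min_complementary_length out) := by unfold Spec_has_dimer_issues; infer_instance

-- ===== CLAIM (what is proved, stated in full; the proofs are below) =====
def Claim_equal_has_dimer_issues : Prop := ∀ (seqs : List String) (min_complementary_length : Int), Dom_has_dimer_issues seqs min_complementary_length → Spec_has_dimer_issues seqs min_complementary_length (has_dimer_issues seqs min_complementary_length)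

-- ===== LEMMAS AND PROOFS =====

-- pointwise complement map over a char list, the common normal form of
-- A's is_complementary and B's _revcomp
def pvMc : List Char → Option (List Char)
  | [] => some []
  | c :: cs =>
    match pvCOMP.get? c, pvMc cs with
    | some d, some ds => some (d :: ds)
    | _, _ => none

theorem pvIsComp_cons (c d : Char) (cs ds : List Char) :
    pvIsComp (c :: cs) (d :: ds) =
      ((match pvCOMP.get? c with | some e => d == e | none => false) && pvIsComp cs ds) := by
  simp only [pvIsComp]
  by_cases hl : cs.length = ds.length
  · simp [hl]
  · simp [hl]

theorem pvIsComp_iff_mc (a y : List Char) : pvIsComp a y = true ↔ pvMc a = some y := by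
  induction a generalizing y with
  | nil => cases y <;> simp [pvIsComp, pvMc]
  | cons c cs ih =>
    cases y with
    | nil =>
      simp only [pvIsComp, pvMc]
      cases h1 : pvCOMP.get? c <;> cases h2 : pvMc cs <;> simp
    | cons d ds =>
      rw [pvIsComp_cons]
      simp only [pvMc]
      cases h1 : pvCOMP.get? c <;> cases h2 : pvMc cs
      · simp
      · simp
      · simp [ih, h2]
      · simp [ih, h2]; exact fun _ => eq_comm

theorem pvMc_of_all (a : List Char) (h : a.all (fun c => pvCOMP.contains c) = true) :
    pvMc a = some (a.map (fun c => (pvCOMP.get? c).getD 'A')) := by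
  induction a with
  | nil => rfl
  | cons c cs ih =>
    simp only [List.all_cons, Bool.and_eq_true] at h
    obtain ⟨h1, h2⟩ := h
    rw [PySem.Dict.contains_eq_isSome_get?] at h1
    cases hg : pvCOMP.get? c with
    | none => rw [hg] at h1; simp at h1
    | some v => simp [pvMc, hg, ih h2]

theorem pvMc_of_not_all (a : List Char) (h : a.all (fun c => pvCOMP.contains c) = false) :
    pvMc a = none := by
  induction a with
  | nil => simp at h
  | cons c cs ih =>
    simp only [List.all_cons, Bool.and_eq_false_iff] at h
    rcases h with h1 | h2
    · rw [PySem.Dict.contains_eq_isSome_get?] at h1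
      cases hg : pvCOMP.get? c with
      | none => simp [pvMc, hg]
      | some v => rw [hg] at h1; simp at h1
    · cases hg : pvCOMP.get? c <;> simp [pvMc, hg, ih h2]

theorem pvRevcomp_eq_some_iff (a b : List Char) :
    pvRevcomp a = some b ↔ pvMc a = some b.reverse := by
  unfold pvRevcomp
  cases hall : a.all (fun c => pvCOMP.contains c) with
  | false => simp [pvMc_of_not_all a hall]
  | true =>
    rw [pvMc_of_all a hall]
    simp only [if_true, Option.some.injEq]
    constructor
    · rintro rfl; simp
    · intro h; rw [List.map_reverse, h, List.reverse_reverse]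

theorem pvWindow_iff (a b : List Char) :
    pvIsComp a b.reverse = true ↔ pvRevcomp a = some b := by
  rw [pvIsComp_iff_mc, pvRevcomp_eq_some_iff]

theorem pvForRange_eq (a b : Int) (f : Int → Bool) :
    pvForRange a b f = (PySem.List.pyRange a b 1).any f := by
  fun_induction pvForRange a b f with
  | case1 a h hfa =>
    rw [PySem.List.pyRange_one_cons h]
    simp [hfa]
  | case2 a h hfa ih =>
    rw [PySem.List.pyRange_one_cons h]
    simp [hfa, ih]
  | case3 a h =>
    rw [PySem.List.pyRange_one_eq_nil (by omega)]
    rfl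

-- B's L-mer set holds exactly the windows A's loop visits
theorem mem_pvKmerSet (s : List Char) (L : Int) (x : List Char) :
    x ∈ pvKmerSet s L ↔
      ∃ k, k ∈ PySem.List.pyRange 0 ((s.length : Int) - L + 1) 1 ∧
        PySem.List.slice s (some k) (some (k + L)) = x := by
  simp [pvKmerSet, PySem.Set.mem_ofList]

theorem pvLocalScan_eq_dimerize (l1 l2 : List Char) (L : Int) :
    pvLocalScan l1 l2 L = pvDimerize (pvKmerSet l1 L) (pvKmerSet l2 L) := by
  rw [Bool.eq_iff_iff]
  unfold pvLocalScan pvDimerize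
  simp only [pvForRange_eq, List.any_eq_true]
  constructor
  · rintro ⟨i, hi, j, hj, hcomp⟩
    rw [pvWindow_iff] at hcomp
    refine ⟨PySem.List.slice l1 (some i) (some (i + L)),
            (mem_pvKmerSet l1 L _).mpr ⟨i, hi, rfl⟩, ?_⟩
    rw [hcomp, PySem.Set.contains_iff]
    exact (mem_pvKmerSet l2 L _).mpr ⟨j, hj, rfl⟩
  · rintro ⟨w, hw, hmatch⟩
    obtain ⟨i, hi, hwi⟩ := (mem_pvKmerSet l1 L w).mp hw
    subst hwi
    cases hrc : pvRevcomp (PySem.List.slice l1 (some i) (some (i + L))) with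
    | none => rw [hrc] at hmatch; simp at hmatch
    | some r =>
      rw [hrc] at hmatch
      obtain ⟨j, hj, hwj⟩ :=
        (mem_pvKmerSet l2 L r).mp ((PySem.Set.contains_iff _ _).mp hmatch)
      subst hwj
      exact ⟨i, hi, j, hj, (pvWindow_iff _ _).mpr hrc⟩

theorem pvCheckComp_fst (l1 l2 : List Char) (L : Int) :
    (pvCheckComp l1 l2 L).1 = pvLocalScan l1 l2 L := by
  unfold pvCheckComp; split <;> simp_all

theorem pvCheckComp_fst_eq_dimerize (l1 l2 : List Char) (L : Int) :
    (pvCheckComp l1 l2 L).1 = pvDimerize (pvKmerSet l1 L) (pvKmerSet l2 L) := by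
  rw [pvCheckComp_fst, pvLocalScan_eq_dimerize]

theorem pvGetD_map_kmer (seqs : List String) (L i : Int) (h0 : 0 ≤ i)
    (h1 : i < (seqs.length : Int)) :
    PySem.List.pyGetD (seqs.map (fun s => pvKmerSet s.toList L)) i PySem.Set.empty
      = pvKmerSet (PySem.List.pyGetD seqs i "").toList L := by
  rw [PySem.List.pyGetD_eq_getElem (seqs.map (fun s => pvKmerSet s.toList L))
        PySem.Set.empty h0 (by simpa using h1),
      PySem.List.pyGetD_eq_getElem seqs "" h0 h1]
  simp

-- a slice starting at or past the end of the list is empty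
theorem pvSlice_of_ge_len (s : List Char) (k e : Int) (hk : (s.length : Int) ≤ k) :
    PySem.List.slice s (some k) (some e) = [] := by
  have hl := PySem.List.length_slice (xs := s) (a := k) (b := e)
  have h1 : PySem.List.clampIdx s.length k = s.length := by
    unfold PySem.List.clampIdx; split_ifs <;> omega
  have h2 : PySem.List.clampIdx s.length e ≤ s.length := PySem.List.clampIdx_le _ _
  exact List.eq_nil_of_length_eq_zero (by omega)

-- for L ≤ 0 the empty window (start = length) is reached and is complementary
theorem pvLocalScan_true_of_nonpos (l1 l2 : List Char) (L : Int) (hL : L ≤ 0) :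
    pvLocalScan l1 l2 L = true := by
  unfold pvLocalScan
  simp only [pvForRange_eq, List.any_eq_true]
  refine ⟨(l1.length : Int), PySem.List.mem_pyRange_one.mpr ⟨by omega, by omega⟩,
          (l2.length : Int), PySem.List.mem_pyRange_one.mpr ⟨by omega, by omega⟩, ?_⟩
  rw [pvSlice_of_ge_len l1 _ _ le_rfl, pvSlice_of_ge_len l2 _ _ le_rfl]
  rfl

-- ===== VERDICT (by name: the statement is the Claim_ definition above) =====
theorem has_dimer_issues_spec : Claim_equal_has_dimer_issues := by
  intro seqs L _
  unfold Spec_has_dimer_issues has_dimer_issues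
  simp only [has_dimer_issues_alt]
  by_cases hseq : seqs = []
  · subst hseq; simp [PySem.List.pyRange_one_eq_nil]
  by_cases hL : L ≤ 0
  · -- degenerate threshold: A finds the empty window at once, B short-circuits
    rw [if_neg (by simpa using hseq)]
    rw [if_pos hL]
    rw [show (!seqs.isEmpty) = true by simp [hseq]]
    rw [List.any_eq_true]
    refine ⟨0, PySem.List.mem_pyRange_one.mpr ⟨le_rfl, by
      have : seqs.length ≠ 0 := by simpa using hseq
      omega⟩, ?_⟩
    have h2L : (((PySem.List.pyGetD seqs 0 "").toList.length : Int)) ≥ L * 2 := by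
      have : (0:Int) ≤ ((PySem.List.pyGetD seqs 0 "").toList.length : Int) := by positivity
      omega
    rw [if_pos h2L, pvCheckComp_fst, pvLocalScan_true_of_nonpos _ _ _ hL]
    simp
  · rw [if_neg (by simpa using hseq)]
    simp only [if_neg hL]
    apply PySem.List.any_congr_mem
    intro i hi
    rw [PySem.List.mem_pyRange_one] at hi
    obtain ⟨hi0, hi1⟩ := hi
    congr 1
    · by_cases hc : ((PySem.List.pyGetD seqs i "").toList.length : Int) ≥ 2 * L
      · rw [if_pos (by omega), if_pos hc, pvCheckComp_fst_eq_dimerize]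
      · rw [if_neg (by omega), if_neg hc]
    · apply PySem.List.any_congr_mem
      intro j hj
      rw [PySem.List.mem_pyRange_one] at hj
      rw [pvCheckComp_fst_eq_dimerize,
          pvGetD_map_kmer seqs L i hi0 hi1,
          pvGetD_map_kmer seqs L j (by omega) (by omega)]
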